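-- pv_equiv track=rewrite | github.com/Dionisless/RelayOptimisation | Файлы/kar_analyse.py | separate_by_plas
-- ===== SOURCE A (Python) =====
-- def tokenize_expression(expression):
--     """
--     Разбивает выражение на токены, поддерживая многоуровневые скобки.
--     """
--     tokens = []
--     current_token = ''
--     bracket_level = 0
--
--     for char in expression:
--         if char == '(' and bracket_level == 0:
--             if current_token:
--                 tokens.append(current_token)
--                 current_token = ''
--             bracket_level += 1
--             current_token += char
--         elif char == ')' and bracket_level > 0:
--             current_token += char
--             bracket_level -= 1
--             if bracket_level == 0:
--                 tokens.append(current_token)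
--                 current_token = ''
--         elif char in ('*', '+') and bracket_level == 0:
--             if current_token:
--                 tokens.append(current_token)
--             tokens.append(char)
--             current_token = ''
--         else:
--             current_token += char
--             if char == '(':
--                 bracket_level += 1
--             elif char == ')':
--                 bracket_level -= 1
--
--     if current_token:
--         tokens.append(current_token)
--
--     return tokens
--
-- def separate_by_plas(expression):
--     tokens = tokenize_expression(expression)
--     global_list = []
--     current_list = []
--     for token in tokens:
--         if token== '+':
--             global_list.append(current_list)
--             current_list = []
--         elif token=='*': continue
--         else: current_list.append(token)
--     global_list.append(current_list)
--     current_list = []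
--     return global_list
-- ===== SOURCE B (Python) =====
-- def separate_by_plas(expression):
--     # Single fused scan: groups tokens between top-level '+' directly,
--     # never building the intermediate flat token list.
--     global_list = []
--     current_list = []
--     current_token = ''
--     bracket_level = 0
--     for char in expression:
--         if char == '(' and bracket_level == 0:
--             if current_token:
--                 current_list.append(current_token)
--             current_token = char
--             bracket_level = 1
--         elif char == ')' and bracket_level > 0:
--             current_token += char
--             bracket_level -= 1
--             if bracket_level == 0:
--                 current_list.append(current_token)
--                 current_token = ''
--         elif char == '+' and bracket_level == 0:
--             if current_token:
--                 current_list.append(current_token)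
--             global_list.append(current_list)
--             current_list = []
--             current_token = ''
--         elif char == '*' and bracket_level == 0:
--             if current_token:
--                 current_list.append(current_token)
--             current_token = ''
--         else:
--             current_token += char
--             if char == '(':
--                 bracket_level += 1
--             elif char == ')':
--                 bracket_level -= 1
--     if current_token:
--         current_list.append(current_token)
--     global_list.append(current_list)
--     return global_list
-- ===== Notes on version B (the rewrite author's own statement) =====
-- stated objective: alternative
-- what changed: Replaced A's two-pass pipeline (tokenize_expression building a flat token list, then a second loop grouping tokens by '+') with a single fused character scan that maintains the current group directly and never materialises the intermediate token list.
import Mathlib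
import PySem

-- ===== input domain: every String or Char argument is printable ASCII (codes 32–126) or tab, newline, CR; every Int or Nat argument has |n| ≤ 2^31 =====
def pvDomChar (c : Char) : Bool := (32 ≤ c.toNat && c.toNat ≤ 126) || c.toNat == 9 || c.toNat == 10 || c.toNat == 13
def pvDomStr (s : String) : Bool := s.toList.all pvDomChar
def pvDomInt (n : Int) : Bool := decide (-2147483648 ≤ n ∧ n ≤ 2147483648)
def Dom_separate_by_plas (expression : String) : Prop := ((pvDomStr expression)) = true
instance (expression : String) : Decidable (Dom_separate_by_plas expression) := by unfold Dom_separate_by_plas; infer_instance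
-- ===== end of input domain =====

-- B fuses A's two passes (tokenize, then group by '+') into one character scan
-- that never builds the intermediate flat token list; same cost class, different decomposition.

-- ===== PORT A =====
-- one step of tokenize_expression's for-loop; state = (tokens, current_token, bracket_level)
def tokStep (st : List (List Char) × List Char × Int) (c : Char) :
    List (List Char) × List Char × Int :=
  let toks := st.1
  let cur := st.2.1
  let lvl := st.2.2
  if c = '(' ∧ lvl = 0 then
    let p := if cur ≠ [] then (toks ++ [cur], ([] : List Char)) else (toks, cur)
    (p.1, p.2 ++ [c], lvl + 1)
  else if c = ')' ∧ 0 < lvl then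
    let cur' := cur ++ [c]
    let lvl' := lvl - 1
    if lvl' = 0 then (toks ++ [cur'], [], lvl') else (toks, cur', lvl')
  else if (c = '*' ∨ c = '+') ∧ lvl = 0 then
    let toks' := if cur ≠ [] then toks ++ [cur] else toks
    (toks' ++ [[c]], [], lvl)
  else
    let cur' := cur ++ [c]
    if c = '(' then (toks, cur', lvl + 1)
    else if c = ')' then (toks, cur', lvl - 1)
    else (toks, cur', lvl)

def tokenize_expression (expression : String) : List (List Char) :=
  let st := expression.toList.foldl tokStep ([], [], 0)
  if st.2.1 ≠ [] then st.1 ++ [st.2.1] else st.1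

-- one step of separate_by_plas's for-loop over tokens; state = (global_list, current_list)
def groupStep (st : List (List (List Char)) × List (List Char)) (t : List Char) :
    List (List (List Char)) × List (List Char) :=
  if t = ['+'] then (st.1 ++ [st.2], [])
  else if t = ['*'] then st
  else (st.1, st.2 ++ [t])

def separate_by_plas (expression : String) : List (List String) :=
  let st := (tokenize_expression expression).foldl groupStep ([], [])
  (st.1 ++ [st.2]).map (List.map String.ofList)

-- ===== PORT B =====
-- one step of B's fused scan; state = (global_list, current_list, current_token, bracket_level)
def bStep (st : List (List (List Char)) × List (List Char) × List Char × Int) (c : Char) :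
    List (List (List Char)) × List (List Char) × List Char × Int :=
  let g := st.1
  let cl := st.2.1
  let cur := st.2.2.1
  let lvl := st.2.2.2
  if c = '(' ∧ lvl = 0 then
    (g, (if cur ≠ [] then cl ++ [cur] else cl), [c], 1)
  else if c = ')' ∧ 0 < lvl then
    let cur' := cur ++ [c]
    let lvl' := lvl - 1
    if lvl' = 0 then (g, cl ++ [cur'], [], lvl') else (g, cl, cur', lvl')
  else if c = '+' ∧ lvl = 0 then
    (g ++ [if cur ≠ [] then cl ++ [cur] else cl], [], [], lvl)
  else if c = '*' ∧ lvl = 0 then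
    (g, (if cur ≠ [] then cl ++ [cur] else cl), [], lvl)
  else
    let cur' := cur ++ [c]
    if c = '(' then (g, cl, cur', lvl + 1)
    else if c = ')' then (g, cl, cur', lvl - 1)
    else (g, cl, cur', lvl)

def separate_by_plas_alt (expression : String) : List (List String) :=
  let st := expression.toList.foldl bStep ([], [], [], 0)
  let cl := if st.2.2.1 ≠ [] then st.2.1 ++ [st.2.2.1] else st.2.1
  (st.1 ++ [cl]).map (List.map String.ofList)

-- ===== PRECONDITION & SPEC =====
def Spec_separate_by_plas (expression : String) (out : List (List String)) : Prop := out = separate_by_plas_alt expression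
instance (expression : String) (out : List (List String)) : Decidable (Spec_separate_by_plas expression out) := by unfold Spec_separate_by_plas; infer_instance

-- ===== CLAIM (what is proved, stated in full; the proofs are below) =====
def Claim_equal_separate_by_plas : Prop := ∀ (expression : String), Dom_separate_by_plas expression → Spec_separate_by_plas expression (separate_by_plas expression)

-- ===== LEMMAS AND PROOFS =====

-- invariant of the tokenizer state: an empty current_token only occurs at level 0,
-- and current_token never starts with '+' or '*'
def TokInv (cur : List Char) (lvl : Int) : Prop :=
  (cur = [] → lvl = 0) ∧ cur.head? ≠ some '+' ∧ cur.head? ≠ some '*'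

theorem tokStep_acc (toks : List (List Char)) (cur : List Char) (lvl : Int) (c : Char) :
    tokStep (toks, cur, lvl) c =
      (toks ++ (tokStep ([], cur, lvl) c).1, (tokStep ([], cur, lvl) c).2) := by
  simp only [tokStep]
  split_ifs <;> simp

theorem tok_acc (cs : List Char) (toks : List (List Char)) (cur : List Char) (lvl : Int) :
    cs.foldl tokStep (toks, cur, lvl) =
      (toks ++ (cs.foldl tokStep ([], cur, lvl)).1, (cs.foldl tokStep ([], cur, lvl)).2) := by
  induction cs generalizing toks cur lvl with
  | nil => simp
  | cons c cs ih =>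
    simp only [List.foldl_cons]
    rw [tokStep_acc]
    obtain ⟨e1, cur1, lvl1⟩ := tokStep ([], cur, lvl) c
    rw [ih (toks ++ e1) cur1 lvl1, ih e1 cur1 lvl1]
    simp

theorem bStep_tokStep (g : List (List (List Char))) (cl : List (List Char))
    (cur : List Char) (lvl : Int) (c : Char) (h : TokInv cur lvl) :
    bStep (g, cl, cur, lvl) c =
      (((tokStep ([], cur, lvl) c).1.foldl groupStep (g, cl)).1,
       ((tokStep ([], cur, lvl) c).1.foldl groupStep (g, cl)).2,
       (tokStep ([], cur, lvl) c).2.1,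
       (tokStep ([], cur, lvl) c).2.2) := by
  obtain ⟨h0, hp, hs⟩ := h
  have flush : ∀ (g : List (List (List Char))) (cl : List (List Char)) (t : List Char),
      t.head? ≠ some '+' → t.head? ≠ some '*' → groupStep (g, cl) t = (g, cl ++ [t]) := by
    intro g cl t h1 h2
    have n1 : t ≠ ['+'] := fun h => h1 (by simp [h])
    have n2 : t ≠ ['*'] := fun h => h2 (by simp [h])
    simp [groupStep, n1, n2]
  have gplus : ∀ (st : List (List (List Char)) × List (List Char)),
      groupStep st ['+'] = (st.1 ++ [st.2], []) := by
    intro st; simp [groupStep]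
  have gstar : ∀ (st : List (List (List Char)) × List (List Char)),
      groupStep st ['*'] = st := by
    intro st; simp [groupStep]
  have happ : ∀ (t : List Char) (x : Char), t ≠ [] → (t ++ [x]).head? = t.head? := by
    intro t x ht; cases t <;> simp_all
  have hcurnil : 0 < lvl → cur ≠ [] := by
    intro hl hc; have := h0 hc; omega
  simp only [bStep, tokStep]
  split_ifs <;> simp_all

theorem Inv_step (cur : List Char) (lvl : Int) (c : Char) (h : TokInv cur lvl) :
    TokInv (tokStep ([], cur, lvl) c).2.1 (tokStep ([], cur, lvl) c).2.2 := by
  obtain ⟨h0, hp, hs⟩ := h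
  simp only [tokStep, TokInv]
  split_ifs <;> simp_all <;>
    (rcases cur with _ | ⟨a, t⟩ <;> simp_all)

theorem main_loop (cs : List Char) (g : List (List (List Char))) (cl : List (List Char))
    (cur : List Char) (lvl : Int) (h : TokInv cur lvl) :
    cs.foldl bStep (g, cl, cur, lvl) =
      (((cs.foldl tokStep ([], cur, lvl)).1.foldl groupStep (g, cl)).1,
       ((cs.foldl tokStep ([], cur, lvl)).1.foldl groupStep (g, cl)).2,
       (cs.foldl tokStep ([], cur, lvl)).2.1,
       (cs.foldl tokStep ([], cur, lvl)).2.2) ∧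
    TokInv (cs.foldl tokStep ([], cur, lvl)).2.1 (cs.foldl tokStep ([], cur, lvl)).2.2 := by
  induction cs generalizing g cl cur lvl with
  | nil => simpa using h
  | cons c cs ih =>
    simp only [List.foldl_cons]
    rw [bStep_tokStep g cl cur lvl c h]
    have hInv := Inv_step cur lvl c h
    rcases hE : tokStep ([], cur, lvl) c with ⟨e1, cur1, lvl1⟩
    rw [hE] at hInv
    dsimp only
    rw [tok_acc cs e1 cur1 lvl1]
    obtain ⟨ih1, ih2⟩ := ih (List.foldl groupStep (g, cl) e1).1 (List.foldl groupStep (g, cl) e1).2 cur1 lvl1 hInv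
    refine ⟨?_, ?_⟩
    · rw [ih1]; simp [List.foldl_append]
    · simpa using ih2

theorem groupStep_flush (st : List (List (List Char)) × List (List Char)) (t : List Char)
    (h1 : t.head? ≠ some '+') (h2 : t.head? ≠ some '*') :
    groupStep st t = (st.1, st.2 ++ [t]) := by
  have n1 : t ≠ ['+'] := fun h => h1 (by simp [h])
  have n2 : t ≠ ['*'] := fun h => h2 (by simp [h])
  simp [groupStep, n1, n2]

-- ===== VERDICT (by name: the statement is the Claim_ definition above) =====
theorem separate_by_plas_spec : Claim_equal_separate_by_plas := by
  intro expression _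
  unfold Spec_separate_by_plas separate_by_plas separate_by_plas_alt tokenize_expression
  have h0 : TokInv [] 0 := ⟨fun _ => rfl, by simp, by simp⟩
  obtain ⟨h1, h2⟩ := main_loop expression.toList [] [] [] 0 h0
  rw [h1]
  rcases hE : expression.toList.foldl tokStep ([], [], 0) with ⟨e, cur, lvl⟩
  rw [hE] at h2
  obtain ⟨hi0, hip, his⟩ := h2
  dsimp only
  by_cases hc : cur = []
  · subst hc; simp
  · simp only [hc, ne_eq, not_false_iff, if_pos]
    rw [List.foldl_append]
    simp only [List.foldl_cons, List.foldl_nil]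
    rw [groupStep_flush _ cur hip his]
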